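-- pv_equiv track=rewrite | github.com/BigAngryDinosaur/amazonoa | best_stock_combos/solution.py | bestCombos
-- ===== SOURCE A (Python) =====
-- def bestCombos(rating, k):
--     n = len(rating)
--     KArr = [rating[0]]
--     for i in range(1, n):
--         cur_KArr_len = len(KArr)
--         for j in range(cur_KArr_len):
--             KArr.append(KArr[j] + rating[i])
--         KArr.append(rating[i])
--     minIndex = k
--     KArr.sort(reverse=True)
--     for i in range(k):
--         if KArr[i] <= 0:
--             minIndex = i
--             break
--     KArr = KArr[:minIndex]
--     return KArr if KArr else [0]
-- ===== SOURCE B (Python) =====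
-- def bestCombos(rating, k):
--     def sums(xs):
--         if not xs:
--             return []
--         s = sums(xs[1:])
--         x = xs[0]
--         return [x] + [x + t for t in s] + s
--     pos = sorted((t for t in sums(rating) if t > 0), reverse=True)[:k]
--     return pos if pos else [0]
-- ===== Notes on version B (the rewrite author's own statement) =====
-- stated objective: simpler
-- what changed: B replaces A's in-place doubling loop with indexed appends, full sort, imperative break-scan and slice by a structural recursion enumerating subset sums, filtering positives BEFORE sorting, and a plain [:k] slice.
-- outside the precondition, e.g. on bestCombos([1, -1], -1): A returns [1, 0], B returns [0]
import Mathlib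
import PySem

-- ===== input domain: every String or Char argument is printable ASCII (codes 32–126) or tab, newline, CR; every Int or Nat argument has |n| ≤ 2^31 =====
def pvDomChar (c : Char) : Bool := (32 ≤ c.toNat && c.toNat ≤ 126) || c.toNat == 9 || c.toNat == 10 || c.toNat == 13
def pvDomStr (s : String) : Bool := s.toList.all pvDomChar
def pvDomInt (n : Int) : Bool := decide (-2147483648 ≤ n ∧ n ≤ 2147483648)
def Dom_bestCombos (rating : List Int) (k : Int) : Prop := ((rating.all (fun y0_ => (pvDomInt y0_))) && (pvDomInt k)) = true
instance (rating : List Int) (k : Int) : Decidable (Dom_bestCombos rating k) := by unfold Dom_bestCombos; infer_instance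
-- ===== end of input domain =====

-- B re-implements the same top-k positive subset sums by a recursive enumeration that
-- filters positives BEFORE sorting and takes a slice instead of A's break-scan; objective: simpler.

-- ===== PORT A =====
-- the 'for i in range(k): if KArr[i] <= 0: …; break' loop of A; out-of-range reads
-- (which raise IndexError in Python and are excluded by Pre_) use default 1
def pvFindMin (L : List Int) (k : Int) : List Int → Int
  | [] => k
  | i :: rest => if PySem.List.pyGetD L i 1 ≤ 0 then i else pvFindMin L k rest

def bestCombos (rating : List Int) (k : Int) : List Int :=
  match rating with
  | [] => []   -- rating[0] raises IndexError in Python; excluded by Pre_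
  | r0 :: _ =>
    let n : Int := PySem.List.len rating
    let kArr1 : List Int :=
      (PySem.List.pyRange 1 n 1).foldl (fun KArr i =>
        let cur : Int := PySem.List.len KArr
        let KArr2 := (PySem.List.pyRange 0 cur 1).foldl
          (fun acc j => acc ++ [PySem.List.pyGetD acc j 0 + PySem.List.pyGetD rating i 0]) KArr
        KArr2 ++ [PySem.List.pyGetD rating i 0]) [r0]
    let sortedK := PySem.List.sorted kArr1 (fun x => x) true
    let minIndex := pvFindMin sortedK k (PySem.List.pyRange 0 k 1)
    let res := PySem.List.slice sortedK none (some minIndex)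
    if res = [] then [0] else res

-- ===== PORT B =====
def pvSums : List Int → List Int
  | [] => []
  | x :: xs =>
    let s := pvSums xs
    [x] ++ s.map (fun t => x + t) ++ s

def bestCombos_alt (rating : List Int) (k : Int) : List Int :=
  let pos := PySem.List.sorted ((pvSums rating).filter (fun t => 0 < t)) (fun x => x) true
  let res := PySem.List.slice pos none (some k)
  if res = [] then [0] else res

-- ===== PRECONDITION & SPEC =====
-- Pre_ excludes exactly: empty rating and k > 2^n - 1 with all elements positive (A raises
-- IndexError there), and negative k, which is outside the natural domain of a top-k request
-- (A then returns an accidental negative-slice value).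
def Pre_bestCombos (rating : List Int) (k : Int) : Prop :=
  rating ≠ [] ∧ 0 ≤ k ∧ (k ≤ 2 ^ rating.length - 1 ∨ ∃ x ∈ rating, x ≤ 0)
instance (rating : List Int) (k : Int) : Decidable (Pre_bestCombos rating k) := by unfold Pre_bestCombos; infer_instance
def pvWitness_bestCombos : List Int × Int := ([1, -2], 2)

def Spec_bestCombos (rating : List Int) (k : Int) (out : List Int) : Prop := out = bestCombos_alt rating k
instance (rating : List Int) (k : Int) (out : List Int) : Decidable (Spec_bestCombos rating k out) := by unfold Spec_bestCombos; infer_instance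

-- ===== CLAIM (what is proved, stated in full; the proofs are below) =====
def Claim_equal_bestCombos : Prop := ∀ (rating : List Int) (k : Int), Dom_bestCombos rating k → Pre_bestCombos rating k → Spec_bestCombos rating k (bestCombos rating k)
-- ===== LEMMAS AND PROOFS =====

-- A's inner loop appends KArr[j] + v for j below the starting length: it equals KArr ++ KArr.map (· + v)
theorem pvInner_eq (K : List Int) (v : Int) :
    (PySem.List.pyRange 0 (PySem.List.len K) 1).foldl
      (fun acc j => acc ++ [PySem.List.pyGetD acc j 0 + v]) K
      = K ++ K.map (fun t => t + v) := by
  have gen : ∀ m, m ≤ K.length →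
      (List.range m).foldl (fun acc (j : Nat) => acc ++ [PySem.List.pyGetD acc (j : Int) 0 + v]) K
        = K ++ (K.take m).map (fun t => t + v) := by
    intro m
    induction m with
    | zero => intro _; simp
    | succ m ih =>
      intro hm
      have hmK : m < K.length := by omega
      rw [List.range_succ, List.foldl_append, ih (by omega)]
      simp only [List.foldl_cons, List.foldl_nil]
      rw [PySem.List.pyGetD_natCast, List.getD_append _ _ _ m hmK,
          List.getD_eq_getElem _ _ hmK]
      rw [List.take_add_one, List.getElem?_eq_getElem hmK]
      simp [List.append_assoc]
      rw [List.take_add_one, List.getElem?_map, List.getElem?_eq_getElem hmK]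
      simp
  have h1 : PySem.List.pyRange 0 (PySem.List.len K) 1
      = (List.range K.length).map (fun j : Nat => (j : Int)) := by
    rw [PySem.List.len_eq]; exact PySem.List.pyRange_zero_natCast K.length
  rw [h1, List.foldl_map, gen K.length le_rfl, List.take_length]

-- A's build loop equals the structural fold
theorem pvBuild_eq (r0 : Int) (rest : List Int) :
    (PySem.List.pyRange 1 (PySem.List.len (r0 :: rest)) 1).foldl (fun KArr i =>
        ((PySem.List.pyRange 0 (PySem.List.len KArr) 1).foldl
          (fun acc j => acc ++ [PySem.List.pyGetD acc j 0 + PySem.List.pyGetD (r0 :: rest) i 0]) KArr)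
        ++ [PySem.List.pyGetD (r0 :: rest) i 0]) [r0]
      = rest.foldl (fun S x => (S ++ S.map (fun t => t + x)) ++ [x]) [r0] := by
  rw [PySem.List.foldl_pyRange_pyGetD (r0 :: rest) 0
      (fun KArr v =>
        ((PySem.List.pyRange 0 (PySem.List.len KArr) 1).foldl
          (fun acc j => acc ++ [PySem.List.pyGetD acc j 0 + v]) KArr) ++ [v]) [r0] (a := 1) (by norm_num)]
  have hf : (fun (S : List Int) (x : Int) =>
      ((PySem.List.pyRange 0 (PySem.List.len S) 1).foldl
        (fun acc j => acc ++ [PySem.List.pyGetD acc j 0 + x]) S) ++ [x])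
      = (fun (S : List Int) (x : Int) => (S ++ S.map (fun t => t + x)) ++ [x]) := by
    funext S x; rw [pvInner_eq]
  rw [hf]
  norm_num

theorem pvSums_snoc_perm (l : List Int) (x : Int) :
    (pvSums (l ++ [x])).Perm (pvSums l ++ (pvSums l).map (fun t => t + x) ++ [x]) := by
  induction l with
  | nil => simp [pvSums]
  | cons y l ih =>
    simp only [List.cons_append, pvSums]
    refine List.Perm.trans (((ih.map (fun t => y + t)).cons y).append ih) ?_
    simp only [List.map_append, List.map_map, List.map_cons, List.map_nil]
    have hcomp : ((fun t : Int => t + x) ∘ (fun t : Int => y + t))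
        = ((fun t : Int => y + t) ∘ (fun t : Int => t + x)) := by
      funext t; simp only [Function.comp_apply]; ring
    rw [hcomp]
    rw [List.perm_iff_count]
    intro a
    simp only [List.count_append, List.count_cons, List.count_nil]
    ring

theorem pvBuild_perm (r0 : Int) (rest : List Int) :
    (rest.foldl (fun S x => (S ++ S.map (fun t => t + x)) ++ [x]) [r0]).Perm (pvSums (r0 :: rest)) := by
  induction rest using List.reverseRecOn with
  | nil => simp [pvSums]
  | append_singleton rest x ih =>
    rw [List.foldl_append]
    simp only [List.foldl_cons, List.foldl_nil]
    rw [← List.cons_append]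
    refine List.Perm.trans ?_ (pvSums_snoc_perm (r0 :: rest) x).symm
    exact (ih.append (ih.map _)).append (List.Perm.refl _)

theorem pvSums_length (l : List Int) : (pvSums l).length = 2 ^ l.length - 1 := by
  induction l with
  | nil => simp [pvSums]
  | cons x l ih =>
    simp only [pvSums, List.length_append, List.length_map, List.length_cons,
      List.singleton_append, ih, pow_succ]
    have h1 : 1 ≤ 2 ^ l.length := Nat.one_le_two_pow
    generalize 2 ^ l.length = t at *
    omega

theorem pvSums_mem_self {x : Int} {l : List Int} (h : x ∈ l) : x ∈ pvSums l := by
  induction l with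
  | nil => cases h
  | cons y l ih =>
    rcases List.mem_cons.mp h with h | h
    · simp [pvSums, h]
    · simp only [pvSums, List.mem_append]
      exact Or.inr (ih h)

theorem pvFindMin_out (L : List Int) (k : Int) :
    ∀ (m j : Nat), L.length ≤ j →
      pvFindMin L k ((List.range' j m).map (fun i : Nat => (i : Int))) = k := by
  intro m
  induction m with
  | zero => intro j _; simp [pvFindMin]
  | succ m ih =>
    intro j hj
    rw [List.range'_succ]
    simp only [List.map_cons, pvFindMin]
    rw [PySem.List.pyGetD_natCast, List.getD_eq_default _ _ hj]
    norm_num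
    exact ih (j + 1) (by omega)

theorem pvFindMin_aux (L : List Int) (k : Int) (_hL : L.Pairwise (fun a b => b ≤ a)) :
    ∀ (m j : Nat), j ≤ (L.takeWhile (fun t => 0 < t)).length →
      pvFindMin L k ((List.range' j m).map (fun i : Nat => (i : Int)))
        = if (L.takeWhile (fun t => 0 < t)).length < j + m ∧ (L.takeWhile (fun t => 0 < t)).length < L.length
          then ((L.takeWhile (fun t => 0 < t)).length : Int) else k := by
  set p : Int → Bool := (fun t => decide (0 < t)) with hp
  set f := (L.takeWhile p).length with hfdef
  have hfle : f ≤ L.length := (List.takeWhile_prefix p).length_le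
  have htake : L.takeWhile p = L.take f := List.prefix_iff_eq_take.mp (List.takeWhile_prefix p)
  have hpos : ∀ j, j < f → 0 < L.getD j 1 := by
    intro j hj
    have hjl : j < L.length := lt_of_lt_of_le hj hfle
    have hjt : j < (L.take f).length := by simp; omega
    have hEl : (L.take f)[j]'hjt = L[j]'hjl := List.getElem_take
    have hmem : L[j]'hjl ∈ L.takeWhile p := by
      rw [htake]; rw [← hEl]; exact List.getElem_mem hjt
    have := List.mem_takeWhile_imp hmem
    rw [List.getD_eq_getElem _ _ hjl]
    simpa [hp] using this
  have hneg : f < L.length → L.getD f 1 ≤ 0 := by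
    intro hfl
    have hQ : L.takeWhile p ++ L.dropWhile p = L := List.takeWhile_append_dropWhile
    have hQne : L.dropWhile p ≠ [] := by
      intro h
      rw [h, List.append_nil] at hQ
      have := congrArg List.length hQ
      simp only [← hfdef] at this
      omega
    have h1 : L.getD f 1 = (L.dropWhile p).getD 0 1 := by
      conv_lhs => rw [← hQ]
      rw [List.getD_append_right _ _ _ _ (le_of_eq hfdef.symm)]
      rw [← hfdef, Nat.sub_self]
    rw [h1]
    rcases hD : L.dropWhile p with _ | ⟨a, t⟩
    · exact absurd hD hQne
    · have h3 := List.head_dropWhile_not p hQne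
      have ha : (L.dropWhile p).head hQne = a := by simp [hD]
      rw [ha] at h3
      simp only [hp, decide_eq_false_iff_not, not_lt] at h3
      simpa [hD] using h3
  intro m
  induction m with
  | zero =>
    intro j hj
    simp only [List.range'_zero, List.map_nil, pvFindMin]
    rw [if_neg]
    omega
  | succ m ih =>
    intro j hj
    rw [List.range'_succ]
    simp only [List.map_cons, pvFindMin]
    rw [PySem.List.pyGetD_natCast]
    by_cases hjf : j < f
    · have h1 : ¬ (L.getD j 1 ≤ 0) := by have := hpos j hjf; omega
      rw [if_neg h1, ih (j + 1) (by omega)]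
      have harr : (j + 1) + m = j + (m + 1) := by omega
      rw [harr]
    · have hjf' : j = f := le_antisymm hj (not_lt.mp hjf)
      subst hjf'
      by_cases hfl : f < L.length
      · rw [if_pos (hneg hfl)]
        rw [if_pos ⟨by omega, hfl⟩]
      · have h1 : ¬ (L.getD f 1 ≤ 0) := by
          rw [List.getD_eq_default _ _ (by omega)]; norm_num
        rw [if_neg h1, pvFindMin_out L k m (f + 1) (by omega), if_neg (by omega)]

theorem pvTakeWhile_eq_filter (L : List Int) (h : L.Pairwise (fun a b => b ≤ a)) :
    L.takeWhile (fun t => 0 < t) = L.filter (fun t => 0 < t) := by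
  induction L with
  | nil => simp
  | cons a L ih =>
    rcases List.pairwise_cons.mp h with ⟨ha, hL⟩
    by_cases h0 : 0 < a
    · simp [h0, ih hL]
    · have hall : ∀ x ∈ L, ¬ (0 < x) := fun x hx => by have := ha x hx; omega
      simp only [List.takeWhile_cons, List.filter_cons, h0, decide_false]
      simp only [Bool.false_eq_true, if_false]
      rw [eq_comm, List.filter_eq_nil_iff]
      intro x hx
      simpa using hall x hx

-- ===== VERDICT (by name: the statement is the Claim_ definition above) =====
theorem bestCombos_spec : Claim_equal_bestCombos := by
  intro rating k _ hpre
  rcases hpre with ⟨hne, hk0, hsafe⟩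
  unfold Spec_bestCombos
  obtain ⟨r0, rest, rfl⟩ : ∃ r0 rest, rating = r0 :: rest := by
    cases rating with
    | nil => exact absurd rfl hne
    | cons a t => exact ⟨a, t, rfl⟩
  simp only [bestCombos, bestCombos_alt]
  rw [pvBuild_eq]
  set p : Int → Bool := (fun t => decide (0 < t)) with hp
  set S : List Int := pvSums (r0 :: rest) with hS
  set B : List Int := rest.foldl (fun S x => (S ++ S.map (fun t => t + x)) ++ [x]) [r0] with hB
  set L : List Int := PySem.List.sorted B (fun x => x) true with hL
  set P : List Int := PySem.List.sorted (S.filter p) (fun x => x) true with hP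
  have hperm : B.Perm S := pvBuild_perm r0 rest
  have hLperm : L.Perm S := (PySem.List.sorted_perm B (fun x => x) true).trans hperm
  have hLpair : L.Pairwise (fun a b => b ≤ a) := PySem.List.sorted_pairwise_rev B (fun x => x)
  have hPfilter : L.filter p = P := by
    apply PySem.List.eq_of_perm_of_pairwise_le_of_injective (fun x : Int => -x) neg_injective
    · exact (hLperm.filter p).trans (PySem.List.sorted_perm (S.filter p) (fun x => x) true).symm
    · exact (hLpair.filter p).imp (by intro a b hab; omega)
    · exact (PySem.List.sorted_pairwise_rev (S.filter p) (fun x => x)).imp (by intro a b hab; omega)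
  have htw : L.takeWhile p = L.filter p := pvTakeWhile_eq_filter L hLpair
  set f := (L.takeWhile p).length with hfdef
  have hfle : f ≤ L.length := (List.takeWhile_prefix p).length_le
  have htake : L.takeWhile p = L.take f := List.prefix_iff_eq_take.mp (List.takeWhile_prefix p)
  have hLlen : L.length = 2 ^ (r0 :: rest).length - 1 := by
    rw [hLperm.length_eq, hS, pvSums_length]
  have hsafe' : (k ≤ (L.length : Int)) ∨ f < L.length := by
    rcases hsafe with hle | ⟨x, hx, hx0⟩
    · left
      rw [hLlen]
      have h1 : 1 ≤ 2 ^ (r0 :: rest).length := Nat.one_le_two_pow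
      push_cast [h1]
      exact hle
    · right
      have hxS : x ∈ S := pvSums_mem_self hx
      have hxL : x ∈ L := hLperm.mem_iff.mpr hxS
      rcases lt_or_eq_of_le hfle with h | h
      · exact h
      · exfalso
        have : L.takeWhile p = L := by rw [htake, h, List.take_length]
        have hmem : x ∈ L.takeWhile p := by rw [this]; exact hxL
        have := List.mem_takeWhile_imp hmem
        simp [hp] at this
        omega
  have hrange : PySem.List.pyRange 0 k 1 = (List.range' 0 k.toNat).map (fun i : Nat => (i : Int)) := by
    rw [← List.range_eq_range']
    conv_lhs => rw [← Int.toNat_of_nonneg hk0]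
    exact PySem.List.pyRange_zero_natCast k.toNat
  rw [hrange, pvFindMin_aux L k hLpair k.toNat 0 (Nat.zero_le f)]
  simp only [Nat.zero_add]
  by_cases hc : f < k.toNat ∧ f < L.length
  · rw [if_pos hc]
    rw [PySem.List.slice_to _ (Int.natCast_nonneg f), PySem.List.slice_to _ hk0]
    rw [Int.toNat_natCast]
    rw [← htake, htw, hPfilter]
    rw [List.take_of_length_le]
    rw [← hPfilter, ← htw, ← hfdef]
    omega
  · rw [if_neg hc]
    rw [PySem.List.slice_to _ hk0, PySem.List.slice_to _ hk0]
    have hkf : k.toNat ≤ f := by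
      rcases Nat.lt_or_ge f k.toNat with h | h
      · exfalso
        have hfL : ¬ f < L.length := fun hx => hc ⟨h, hx⟩
        have hfeq : f = L.length := le_antisymm hfle (not_lt.mp hfL)
        rcases hsafe' with hk | hflt
        · have h2 : k.toNat ≤ L.length := by omega
          omega
        · exact hfL hflt
      · exact h
    rw [← hPfilter, ← htw, htake, List.take_take, Nat.min_eq_left hkf]
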